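-- pv_equiv track=rewrite | github.com/baranaskari/marshall-py | lesson44/lesson44.py | c_frequency
-- ===== SOURCE A (Python) =====
-- def c_frequency(word):
--     clean_word = sorted(word.lower())
--     answer = {}
--
--     for character in clean_word:
--         if character not in answer:
--             answer[character] = 1
--         else:
--             answer[character] += 1
--
--     return answer
-- ===== SOURCE B (Python) =====
-- def c_frequency(word):
--     rest = list(word.lower())
--     answer = {}
--     while rest:
--         m = min(rest)
--         answer[m] = rest.count(m)
--         rest = [c for c in rest if c != m]
--     return answer
-- ===== Notes on version B (the rewrite author's own statement) =====
-- stated objective: alternative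
-- what changed: Instead of sorting all characters and accumulating counts one-by-one into a dict, B never sorts: it repeatedly extracts the minimum remaining character, records its count, and filters it out, emitting keys directly in ascending order.
import Mathlib
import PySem

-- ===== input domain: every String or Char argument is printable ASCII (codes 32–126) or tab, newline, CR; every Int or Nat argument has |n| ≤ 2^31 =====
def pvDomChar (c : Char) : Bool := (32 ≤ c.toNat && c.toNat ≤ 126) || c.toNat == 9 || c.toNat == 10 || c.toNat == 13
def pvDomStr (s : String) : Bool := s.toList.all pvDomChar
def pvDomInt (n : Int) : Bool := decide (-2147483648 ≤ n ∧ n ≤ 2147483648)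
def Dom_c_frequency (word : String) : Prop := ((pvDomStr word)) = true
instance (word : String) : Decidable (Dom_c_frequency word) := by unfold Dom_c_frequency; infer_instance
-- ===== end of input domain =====

-- B replaces A's sort-then-accumulate pass by repeated minimum extraction: take the min remaining
-- character, record its count, filter it out, repeat (objective: alternative; B never sorts).

-- ===== PORT A =====
-- the dict is keyed by the 1-character strings Python iterates over; modelled with Char keys, rendered as String at return
def c_frequency (word : String) : List (String × Int) :=
  let clean_word := PySem.List.sorted (PySem.Chars.lower word.toList) (fun c => c) false
  let answer := clean_word.foldl
    (fun (d : PySem.Dict Char Int) ch =>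
      if d.contains ch = false then d.insert ch 1 else d.insert ch (d.getD ch 0 + 1))
    PySem.Dict.empty
  answer.items.map (fun p => (p.1.toString, p.2))

-- ===== PORT B =====
-- the 'while rest:' loop of Source B: min(rest) is none exactly when rest is empty (loop exit)
def freqLoop (rest : List Char) (answer : PySem.Dict Char Int) : PySem.Dict Char Int :=
  match h : PySem.List.min? rest (fun c => c) with
  | none => answer
  | some m =>
      freqLoop (rest.filter (fun c => c != m)) (answer.insert m ((PySem.List.count rest m : Int)))
termination_by rest.length
decreasing_by
  have hm : m ∈ rest := PySem.List.min?_mem h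
  simp only [List.unattach_filter, List.unattach_attach]
  rw [List.length_filter_lt_length_iff_exists]
  exact ⟨m, hm, by simp⟩

def c_frequency_alt (word : String) : List (String × Int) :=
  let rest := PySem.Chars.lower word.toList
  (freqLoop rest PySem.Dict.empty).items.map (fun p => (p.1.toString, p.2))

-- ===== PRECONDITION & SPEC =====
def Spec_c_frequency (word : String) (out : List (String × Int)) : Prop := out = c_frequency_alt word
instance (word : String) (out : List (String × Int)) : Decidable (Spec_c_frequency word out) := by unfold Spec_c_frequency; infer_instance

-- ===== CLAIM (what is proved, stated in full; the proofs are below) =====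
def Claim_equal_c_frequency : Prop := ∀ (word : String), Dom_c_frequency word → Spec_c_frequency word (c_frequency word)

-- ===== LEMMAS AND PROOFS =====

-- the distinct elements of a list sorted ascending (= ordered dedup of the sort)
def sortedKeys (xs : List Char) : List Char :=
  PySem.Set.ofList (PySem.List.sorted xs (fun c => c) false)

theorem ofList_sublist (xs : List Char) : (PySem.Set.ofList xs).Sublist xs := by
  induction xs with
  | nil => simp [PySem.Set.ofList_nil]
  | cons x xs ih =>
      rw [PySem.Set.ofList_cons]
      refine List.Sublist.cons₂ x ?_
      exact List.Sublist.trans (by simp [PySem.Set.discard, List.filter_sublist]) ih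

theorem sortedKeys_pairwise (xs : List Char) : (sortedKeys xs).Pairwise (· < ·) := by
  have hsub := ofList_sublist (PySem.List.sorted xs (fun c => c) false)
  have hle : (sortedKeys xs).Pairwise (· ≤ ·) :=
    (PySem.List.sorted_pairwise xs (fun c => c)).sublist hsub
  have hnd : (sortedKeys xs).Nodup := PySem.Set.nodup_ofList _
  exact (hle.and hnd).imp (fun h => lt_of_le_of_ne h.1 h.2)

theorem mem_sortedKeys (xs : List Char) (k : Char) : k ∈ sortedKeys xs ↔ k ∈ xs := by
  simp [sortedKeys, PySem.Set.mem_ofList, PySem.List.mem_sorted]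

-- two strictly increasing lists with the same members are equal
theorem eq_of_pairwise_lt_of_mem_iff (l₁ l₂ : List Char)
    (h₁ : l₁.Pairwise (· < ·)) (h₂ : l₂.Pairwise (· < ·))
    (hmem : ∀ k, k ∈ l₁ ↔ k ∈ l₂) : l₁ = l₂ := by
  have hnd₁ : l₁.Nodup := h₁.imp ne_of_lt
  have hnd₂ : l₂.Nodup := h₂.imp ne_of_lt
  have hperm : l₁.Perm l₂ := (List.perm_ext_iff_of_nodup hnd₁ hnd₂).mpr hmem
  exact hperm.eq_of_pairwise (fun a b _ _ hab hba => le_antisymm hab hba)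
    (h₁.imp le_of_lt) (h₂.imp le_of_lt)

-- extracting the min peels off the head of the sorted key list
theorem sortedKeys_min_cons (xs : List Char) (m : Char)
    (hmin : PySem.List.min? xs (fun c => c) = some m) :
    sortedKeys xs = m :: sortedKeys (xs.filter (fun c => c != m)) := by
  have hm : m ∈ xs := PySem.List.min?_mem hmin
  have hlo : ∀ y ∈ xs, m ≤ y := PySem.List.min?_isMin hmin
  apply eq_of_pairwise_lt_of_mem_iff
  · exact sortedKeys_pairwise xs
  · rw [List.pairwise_cons]
    refine ⟨?_, sortedKeys_pairwise _⟩
    intro a ha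
    rw [mem_sortedKeys, List.mem_filter] at ha
    have ham : a ≠ m := by simpa using ha.2
    exact lt_of_le_of_ne (hlo a ha.1) ham.symm
  · intro k
    rw [mem_sortedKeys, List.mem_cons, mem_sortedKeys, List.mem_filter]
    constructor
    · intro hk
      by_cases hkm : k = m
      · exact Or.inl hkm
      · exact Or.inr ⟨hk, by simpa using hkm⟩
    · rintro (rfl | ⟨hk, _⟩)
      · exact hm
      · exact hk

-- counts of other characters survive the filter
theorem count_filter_ne (xs : List Char) (m k : Char) (h : k ≠ m) :
    (xs.filter (fun c => c != m)).count k = xs.count k := by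
  rw [List.count_filter]
  simp [h]

-- B's loop, as items: appends the (key, count) pairs for the sorted distinct keys
theorem itemsB (n : Nat) (rest : List Char) (d : PySem.Dict Char Int)
    (hn : rest.length = n)
    (hfresh : ∀ k ∈ rest, d.contains k = false) :
    (freqLoop rest d).items
      = d.items ++ (sortedKeys rest).map (fun k => (k, (rest.count k : Int))) := by
  induction n using Nat.strong_induction_on generalizing rest d with
  | _ n ih =>
  rw [freqLoop.eq_def]
  split
  next hmin =>
      have : rest = [] := (PySem.List.min?_eq_none_iff _ _).mp hmin
      subst this
      simp [sortedKeys, PySem.List.sorted, PySem.Set.ofList_nil]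
  next m hmin =>
      have hm : m ∈ rest := PySem.List.min?_mem hmin
      have hlen : (rest.filter (fun c => c != m)).length < rest.length := by
        rw [List.length_filter_lt_length_iff_exists]
        exact ⟨m, hm, by simp⟩
      have hfresh' : ∀ k ∈ rest.filter (fun c => c != m),
          (d.insert m ((PySem.List.count rest m : Int))).contains k = false := by
        intro k hk
        rw [List.mem_filter] at hk
        rw [PySem.Dict.contains_insert]
        have h1 : (k == m) = false := by simpa using hk.2
        rw [h1, hfresh k hk.1]
        rfl
      rw [ih _ (hn ▸ hlen) _ _ rfl hfresh']
      rw [PySem.Dict.items_insert_of_not_contains d _ (hfresh m hm)]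
      rw [sortedKeys_min_cons rest m hmin]
      simp only [List.map_cons, List.append_assoc, List.cons_append, List.nil_append]
      congr 2
      apply List.map_congr_left
      intro k hk
      have hkm : k ≠ m := by
        have := (mem_sortedKeys _ k).mp hk
        rw [List.mem_filter] at this
        simpa using this.2
      rw [count_filter_ne rest m k hkm]

-- A's loop body is, pointwise, the Counter step
theorem stepA_eq (d : PySem.Dict Char Int) (ch : Char) :
    (if d.contains ch = false then d.insert ch 1 else d.insert ch (d.getD ch 0 + 1))
      = d.insert ch (d.getD ch 0 + 1) := by
  by_cases h : d.contains ch = false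
  · rw [if_pos h, PySem.Dict.getD_of_not_contains d 0 h]; norm_num
  · simp [h]

-- A's fold over the sorted characters, as items: the same sorted distinct keys with counts of lw
theorem itemsA (lw : List Char) :
    ((PySem.List.sorted lw (fun c => c) false).foldl
      (fun (d : PySem.Dict Char Int) ch =>
        if d.contains ch = false then d.insert ch 1 else d.insert ch (d.getD ch 0 + 1))
      PySem.Dict.empty).items
      = (sortedKeys lw).map (fun k => (k, (lw.count k : Int))) := by
  rw [PySem.List.foldl_congr_mem (PySem.List.sorted lw (fun c => c) false) _
        (fun (d : PySem.Dict Char Int) ch => d.insert ch (d.getD ch 0 + 1)) PySem.Dict.empty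
        (fun acc ch _ => stepA_eq acc ch)]
  rw [PySem.Dict.foldl_insert_getD_add_one_eq_counter, PySem.Dict.items_counter]
  apply List.map_congr_left
  intro k _
  have := (PySem.List.sorted_perm lw (fun c => c) false).count_eq k
  simp [this]

-- ===== VERDICT (by name: the statement is the Claim_ definition above) =====
theorem c_frequency_spec : Claim_equal_c_frequency := by
  intro word _
  unfold Spec_c_frequency c_frequency c_frequency_alt
  simp only
  rw [itemsA, itemsB (PySem.Chars.lower word.toList).length _ _ rfl
        (by intro k _; simp [PySem.Dict.contains_empty])]
  simp [PySem.Dict.empty]
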